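-- pv_equiv track=rewrite | github.com/struggling-student/PythonExercises | Esami/2021-2022/Esame-5/program.aspo.py | ex4set
-- ===== SOURCE A (Python) =====
-- def ex4(start, words):
--     s = ex4set(start, words)
--     # if start[0]!='p':
--     #     return s
--     return sorted(s, key=lambda x: (len(x), x))
--
-- def ex4set(start, words):
--     if len(words) == 0:
--         return {start}
--     ret = set()
--     append_list = [w for w in words if start.endswith(w[0])]
--     if len(append_list) == 0:
--         return {start}
--     for word in append_list:
--         ret.update(ex4(start[:-1]+word, words-{word}))
--     return ret
-- ===== SOURCE B (Python) =====
-- def ex4set(start, words):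
--     # Different decomposition: one plain recursion that keeps each branch's
--     # completions as a duplicate-free list sorted by (len, word) and unions
--     # branches by linear merging, instead of A's mutual recursion that builds
--     # a set and re-sorts the whole set at every level.
--     app = [w for w in words if start.endswith(w[0])]
--     if not app:
--         return {start}
--     result = set()
--     for w in app:
--         result.update(_chains(start[:-1] + w, words - {w}))
--     return result
--
-- def _chains(cur, rem):
--     """All completed chains from cur using rem, as a duplicate-free list
--     sorted by (len(x), x)."""
--     app = [w for w in rem if cur.endswith(w[0])]
--     if not app:
--         return [cur]
--     out = []
--     for w in app:
--         out = _merge(out, _chains(cur[:-1] + w, rem - {w}))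
--     return out
--
-- def _merge(xs, ys):
--     """Union of two sorted duplicate-free lists, sorted, duplicate-free."""
--     out = []
--     i = j = 0
--     while i < len(xs) and j < len(ys):
--         kx = (len(xs[i]), xs[i])
--         ky = (len(ys[j]), ys[j])
--         if kx < ky:
--             out.append(xs[i]); i += 1
--         elif ky < kx:
--             out.append(ys[j]); j += 1
--         else:
--             out.append(xs[i]); i += 1; j += 1
--     out.extend(xs[i:])
--     out.extend(ys[j:])
--     return out
-- ===== Notes on version B (the rewrite author's own statement) =====
-- stated objective: alternative
-- what changed: B replaces A's mutual recursion (build a set of completions, re-sort the whole set at every level) with a single recursion that keeps each branch's completions as a duplicate-free list sorted by (len, word) and unions branches by linear two-pointer merging, so no sorting happens anywhere.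
import Mathlib
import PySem

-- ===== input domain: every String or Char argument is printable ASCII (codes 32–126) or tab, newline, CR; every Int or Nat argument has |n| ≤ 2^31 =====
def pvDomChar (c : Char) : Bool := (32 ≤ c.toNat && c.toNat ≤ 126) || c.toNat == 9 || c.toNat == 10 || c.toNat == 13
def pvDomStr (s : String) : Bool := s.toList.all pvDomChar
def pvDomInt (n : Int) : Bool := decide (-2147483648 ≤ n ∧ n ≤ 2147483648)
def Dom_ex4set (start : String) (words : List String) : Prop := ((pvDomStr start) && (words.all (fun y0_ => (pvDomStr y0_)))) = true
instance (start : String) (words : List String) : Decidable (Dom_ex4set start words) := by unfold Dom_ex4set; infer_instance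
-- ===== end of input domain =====

-- B replaces A's mutual recursion (build a set, re-sort the whole set at every level) by a
-- single recursion keeping each branch's completions as a duplicate-free (len, word)-sorted
-- list, uniting branches by linear merging (objective: alternative; no speed claim).

-- Python's sort key `lambda x: (len(x), x)`: tuples compare lexicographically, which is the
-- `Lex` order on the pair (used by both ports).
def pvKey (x : String) : Lex (Int × String) := toLex (PySem.Str.len x, x)

-- `start.endswith(w[0])`; `w[0]` on the empty string is an IndexError (none), excluded by Pre_.
def pvApp (start w : String) : Bool :=
  match PySem.Str.pyGet? w 0 with
  | some c => PySem.Str.endswith start (String.ofList [c])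
  | none => false

theorem pvDiff_length_lt {w : String} {words : List String} (h : w ∈ words) :
    (PySem.Set.diff words [w]).length < words.length := by
  have : ¬ (w ∈ PySem.Set.diff words [w]) := by
    simp [PySem.Set.diff, List.mem_filter, PySem.Set.contains]
  have hle : (PySem.Set.diff words [w]).length ≤ words.length := List.length_filter_le _ _
  rcases Nat.lt_or_ge (PySem.Set.diff words [w]).length words.length with h' | h'
  · exact h'
  · exfalso
    have hsub : (PySem.Set.diff words [w]).Sublist words := List.filter_sublist
    have : PySem.Set.diff words [w] = words :=
      hsub.eq_of_length (Nat.le_antisymm hle h')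
    exact ‹¬ _› (this ▸ h)

-- ===== PORT A =====
mutual
def ex4 (start : String) (words : List String) : List String :=
  PySem.List.sorted (ex4set start words) pvKey
termination_by (words.length, 1)

def ex4set (start : String) (words : List String) : List String :=
  if words.length = 0 then PySem.Set.ofList [start]
  else
    let append_list := words.filter (fun w => pvApp start w)
    if append_list.length = 0 then PySem.Set.ofList [start]
    else
      append_list.attach.foldl
        (fun ret w =>
          PySem.Set.update ret
            (ex4 (PySem.Str.slice start none (some (-1)) ++ w.1) (PySem.Set.diff words [w.1])))
        PySem.Set.empty
termination_by (words.length, 0)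
decreasing_by
  all_goals first
    | exact Prod.Lex.right _ (by omega)
    | · have h2 : ↑w ∈ words.filter (fun w => pvApp start w) := by
          simpa [append_list] using w.2
        exact Prod.Lex.left _ _ (pvDiff_length_lt (List.mem_of_mem_filter h2))
end

-- ===== PORT B =====
def pvMerge : List String → List String → List String
  | [], ys => ys
  | x :: xs, [] => x :: xs
  | x :: xs, y :: ys =>
    if pvKey x < pvKey y then x :: pvMerge xs (y :: ys)
    else if pvKey y < pvKey x then y :: pvMerge (x :: xs) ys
    else x :: pvMerge xs ys

def pvChains (cur : String) (rem : List String) : List String :=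
  let app := rem.filter (fun w => pvApp cur w)
  if app.length = 0 then [cur]
  else
    app.attach.foldl
      (fun out w =>
        pvMerge out
          (pvChains (PySem.Str.slice cur none (some (-1)) ++ w.1) (PySem.Set.diff rem [w.1])))
      []
termination_by rem.length
decreasing_by
  have h2 : ↑w ∈ rem.filter (fun w => pvApp cur w) := by
    simpa [app] using w.2
  exact pvDiff_length_lt (List.mem_of_mem_filter h2)

def ex4set_alt (start : String) (words : List String) : List String :=
  let app := words.filter (fun w => pvApp start w)
  if app.length = 0 then PySem.Set.ofList [start]
  else
    app.attach.foldl
      (fun result w =>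
        PySem.Set.update result
          (pvChains (PySem.Str.slice start none (some (-1)) ++ w.1) (PySem.Set.diff words [w.1])))
      PySem.Set.empty

-- ===== PRECONDITION & SPEC =====
-- Pre_ excludes exactly the inputs where the Python A raises IndexError (an empty string
-- among the words makes `w[0]` fail); B raises there too.
def Pre_ex4set (start : String) (words : List String) : Prop := "" ∉ words
instance (start : String) (words : List String) : Decidable (Pre_ex4set start words) := by unfold Pre_ex4set; infer_instance
def pvWitness_ex4set : String × List String := ("ab", ["b1", "b22"])

def Spec_ex4set (start : String) (words : List String) (out : List String) : Prop := out = ex4set_alt start words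
instance (start : String) (words : List String) (out : List String) : Decidable (Spec_ex4set start words out) := by unfold Spec_ex4set; infer_instance

-- ===== CLAIM (what is proved, stated in full; the proofs are below) =====
def Claim_equal_ex4set : Prop := ∀ (start : String) (words : List String), Dom_ex4set start words → Pre_ex4set start words → Spec_ex4set start words (ex4set start words)

-- ===== LEMMAS AND PROOFS =====

theorem pvKey_inj : Function.Injective pvKey := by
  intro a b h
  have := congrArg (fun p => (ofLex p).2) h
  simpa [pvKey] using this

theorem pv_nodup_of_pairwise_lt {xs : List String}
    (h : xs.Pairwise (fun a b => pvKey a < pvKey b)) : xs.Nodup :=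
  h.imp (fun {a b} hab heq => absurd (heq ▸ hab) (lt_irrefl _))

theorem pv_mem_pvMerge (xs ys : List String) (a : String) :
    a ∈ pvMerge xs ys ↔ a ∈ xs ∨ a ∈ ys := by
  induction xs, ys using pvMerge.induct with
  | case1 ys => simp [pvMerge]
  | case2 x xs => simp [pvMerge]
  | case3 x xs y ys h ih =>
    rw [pvMerge, if_pos h]
    simp [ih]; tauto
  | case4 x xs y ys h h' ih =>
    rw [pvMerge, if_neg h, if_pos h']
    simp [ih]; tauto
  | case5 x xs y ys h h' ih =>
    have hxy : x = y := pvKey_inj (le_antisymm (not_lt.mp h') (not_lt.mp h))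
    rw [pvMerge, if_neg h, if_neg h']
    subst hxy
    simp [ih]; tauto

theorem pv_pairwise_pvMerge (xs ys : List String)
    (hx : xs.Pairwise (fun a b => pvKey a < pvKey b))
    (hy : ys.Pairwise (fun a b => pvKey a < pvKey b)) :
    (pvMerge xs ys).Pairwise (fun a b => pvKey a < pvKey b) := by
  induction xs, ys using pvMerge.induct with
  | case1 ys => simpa [pvMerge] using hy
  | case2 x xs => simpa [pvMerge] using hx
  | case3 x xs y ys h ih =>
    rw [pvMerge, if_pos h]
    rw [List.pairwise_cons] at hx ⊢
    refine ⟨?_, ih hx.2 hy⟩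
    intro z hz
    rcases (pv_mem_pvMerge _ _ _).mp hz with hzx | hzy
    · exact hx.1 z hzx
    · rcases List.mem_cons.mp hzy with rfl | hzys
      · exact h
      · exact lt_trans (h) ((List.pairwise_cons.mp hy).1 z hzys)
  | case4 x xs y ys h h' ih =>
    rw [pvMerge, if_neg h, if_pos h']
    rw [List.pairwise_cons] at hy ⊢
    refine ⟨?_, ih hx hy.2⟩
    intro z hz
    rcases (pv_mem_pvMerge _ _ _).mp hz with hzx | hzy
    · rcases List.mem_cons.mp hzx with rfl | hzxs
      · exact h'
      · exact lt_trans (h') ((List.pairwise_cons.mp hx).1 z hzxs)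
    · exact hy.1 z hzy
  | case5 x xs y ys h h' ih =>
    have hxy : x = y := pvKey_inj (le_antisymm (not_lt.mp h') (not_lt.mp h))
    rw [pvMerge, if_neg h, if_neg h']
    subst hxy
    rw [List.pairwise_cons] at hx hy ⊢
    refine ⟨?_, ih hx.2 hy.2⟩
    intro z hz
    rcases (pv_mem_pvMerge _ _ _).mp hz with hzx | hzy
    · exact hx.1 z hzx
    · exact hy.1 z hzy

theorem pv_sorted_strict {xs : List String} (h : xs.Nodup) :
    (PySem.List.sorted xs pvKey).Pairwise (fun a b => pvKey a < pvKey b) := by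
  have hle := PySem.List.sorted_pairwise xs pvKey
  have hnd : (PySem.List.sorted xs pvKey).Nodup :=
    (PySem.List.sorted_perm xs pvKey false).nodup_iff.mpr h
  exact (hle.and hnd).imp (fun {a b} hab => lt_of_le_of_ne hab.1 (fun hk => hab.2 (pvKey_inj hk)))

theorem pv_foldU_mem {β : Type} (l : List β) (f : β → List String)
    (s0 : List String) (a : String) :
    a ∈ l.foldl (fun s w => PySem.Set.update s (f w)) s0 ↔ a ∈ s0 ∨ ∃ w ∈ l, a ∈ f w := by
  induction l generalizing s0 with
  | nil => simp
  | cons x t ih => simp [ih, PySem.Set.mem_update]; tauto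

theorem pv_foldU_nodup {β : Type} (l : List β) (f : β → List String)
    (s0 : List String) (h : s0.Nodup) :
    (l.foldl (fun s w => PySem.Set.update s (f w)) s0).Nodup := by
  induction l generalizing s0 with
  | nil => exact h
  | cons x t ih => exact ih _ (PySem.Set.nodup_update _ _ h)

theorem pv_foldM_mem {β : Type} (l : List β) (f : β → List String)
    (acc : List String) (a : String) :
    a ∈ l.foldl (fun out w => pvMerge out (f w)) acc ↔ a ∈ acc ∨ ∃ w ∈ l, a ∈ f w := by
  induction l generalizing acc with
  | nil => simp
  | cons x t ih => simp [ih, pv_mem_pvMerge]; tauto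

theorem pv_foldM_pairwise {β : Type} (l : List β) (f : β → List String)
    (acc : List String) (hacc : acc.Pairwise (fun a b => pvKey a < pvKey b))
    (hf : ∀ w ∈ l, (f w).Pairwise (fun a b => pvKey a < pvKey b)) :
    (l.foldl (fun out w => pvMerge out (f w)) acc).Pairwise (fun a b => pvKey a < pvKey b) := by
  induction l generalizing acc with
  | nil => exact hacc
  | cons x t ih =>
    exact ih _ (pv_pairwise_pvMerge _ _ hacc (hf x (by simp))) (fun w hw => hf w (by simp [hw]))

theorem pv_nodup_ex4set (start : String) (words : List String) :
    (ex4set start words).Nodup := by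
  rw [ex4set]
  by_cases h1 : words.length = 0
  · simp [h1, PySem.Set.ofList, PySem.Set.add, PySem.Set.empty, PySem.Set.contains]
  · by_cases h2 : (words.filter (fun w => pvApp start w)).length = 0
    · simp [h1, h2, PySem.Set.ofList, PySem.Set.add, PySem.Set.empty, PySem.Set.contains]
    · simp only [h1, h2, ite_false]
      exact pv_foldU_nodup _ _ _ List.nodup_nil

theorem pv_mainAux : ∀ (n : Nat) (rem : List String), rem.length ≤ n → ∀ (cur : String),
    pvChains cur rem = PySem.List.sorted (ex4set cur rem) pvKey := by
  intro n
  induction n with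
  | zero =>
    intro rem hlen cur
    have : rem = [] := List.length_eq_zero_iff.mp (Nat.le_zero.mp hlen)
    subst this
    rw [pvChains, ex4set]
    simp
    exact (PySem.List.sorted_eq_of_perm_of_pairwise_lt _ [cur] pvKey (List.Perm.refl _)
      (List.pairwise_singleton _ _)).symm
  | succ n ih =>
    intro rem hlen cur
    rw [pvChains, ex4set]
    by_cases happ : (rem.filter (fun w => pvApp cur w)).length = 0
    · -- no appendable word (covers rem = [])
      by_cases hrem : rem.length = 0
      · simp [hrem, happ]
        exact (PySem.List.sorted_eq_of_perm_of_pairwise_lt _ [cur] pvKey (List.Perm.refl _)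
          (List.pairwise_singleton _ _)).symm
      · simp [hrem, happ]
        exact (PySem.List.sorted_eq_of_perm_of_pairwise_lt _ [cur] pvKey (List.Perm.refl _)
          (List.pairwise_singleton _ _)).symm
    · have hrem : ¬ rem.length = 0 := by
        intro h0
        rw [List.length_eq_zero_iff.mp h0] at happ
        simp at happ
      simp only [hrem, happ, ite_false]
      -- both sides are folds over the attached appendable list
      set app := rem.filter (fun w => pvApp cur w) with happdef
      have hbranch : ∀ w ∈ app,
          pvChains (PySem.Str.slice cur none (some (-1)) ++ w) (PySem.Set.diff rem [w])
            = PySem.List.sorted (ex4set (PySem.Str.slice cur none (some (-1)) ++ w)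
                (PySem.Set.diff rem [w])) pvKey := by
        intro w hw
        exact ih _ (by
          have := pvDiff_length_lt (List.mem_of_mem_filter hw)
          omega) _
      -- characterise the A-side fold
      have hSmem : ∀ a, a ∈ app.attach.foldl
          (fun ret w => PySem.Set.update ret
            (ex4 (PySem.Str.slice cur none (some (-1)) ++ w.1) (PySem.Set.diff rem [w.1])))
          PySem.Set.empty ↔
          ∃ w ∈ app, a ∈ ex4set (PySem.Str.slice cur none (some (-1)) ++ w)
            (PySem.Set.diff rem [w]) := by
        intro a
        rw [pv_foldU_mem]
        simp only [PySem.Set.empty, List.not_mem_nil, false_or]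
        constructor
        · rintro ⟨⟨w, hw⟩, -, hmem⟩
          rw [ex4] at hmem
          exact ⟨w, hw, (PySem.List.mem_sorted _ _ _ _).mp hmem⟩
        · rintro ⟨w, hw, hmem⟩
          exact ⟨⟨w, hw⟩, List.mem_attach _ _, by
            rw [ex4]; exact (PySem.List.mem_sorted _ _ _ _).mpr hmem⟩
      have hSnodup : (app.attach.foldl
          (fun ret w => PySem.Set.update ret
            (ex4 (PySem.Str.slice cur none (some (-1)) ++ w.1) (PySem.Set.diff rem [w.1])))
          PySem.Set.empty).Nodup := pv_foldU_nodup _ _ _ List.nodup_nil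
      -- characterise the B-side fold
      have hLmem : ∀ a, a ∈ app.attach.foldl
          (fun out w => pvMerge out
            (pvChains (PySem.Str.slice cur none (some (-1)) ++ w.1) (PySem.Set.diff rem [w.1])))
          [] ↔
          ∃ w ∈ app, a ∈ ex4set (PySem.Str.slice cur none (some (-1)) ++ w)
            (PySem.Set.diff rem [w]) := by
        intro a
        rw [pv_foldM_mem]
        simp only [List.not_mem_nil, false_or]
        constructor
        · rintro ⟨⟨w, hw⟩, -, hmem⟩
          rw [hbranch w hw] at hmem
          exact ⟨w, hw, (PySem.List.mem_sorted _ _ _ _).mp hmem⟩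
        · rintro ⟨w, hw, hmem⟩
          exact ⟨⟨w, hw⟩, List.mem_attach _ _, by
            rw [hbranch w hw]; exact (PySem.List.mem_sorted _ _ _ _).mpr hmem⟩
      have hLpw : (app.attach.foldl
          (fun out w => pvMerge out
            (pvChains (PySem.Str.slice cur none (some (-1)) ++ w.1) (PySem.Set.diff rem [w.1])))
          []).Pairwise (fun a b => pvKey a < pvKey b) := by
        refine pv_foldM_pairwise _ _ _ (List.Pairwise.nil) ?_
        rintro ⟨w, hw⟩ -
        rw [hbranch w hw]
        exact pv_sorted_strict (pv_nodup_ex4set _ _)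
      refine (PySem.List.sorted_eq_of_perm_of_pairwise_lt _ _ pvKey ?_ hLpw).symm
      refine (List.perm_ext_iff_of_nodup (pv_nodup_of_pairwise_lt hLpw) hSnodup).mpr ?_
      intro a
      rw [hLmem a, hSmem a]

-- ===== VERDICT (by name: the statement is the Claim_ definition above) =====
theorem ex4set_spec : Claim_equal_ex4set := by
  intro start words _ _
  unfold Spec_ex4set
  rw [ex4set, ex4set_alt]
  by_cases hw0 : words.length = 0
  · have : words = [] := List.length_eq_zero_iff.mp hw0
    subst this
    simp
  · simp only [hw0, ite_false]
    have hfun : (fun (ret : List String) (w : {x // x ∈ words.filter (fun w => pvApp start w)}) =>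
        PySem.Set.update ret
          (ex4 (PySem.Str.slice start none (some (-1)) ++ w.1) (PySem.Set.diff words [w.1])))
        = (fun result w =>
        PySem.Set.update result
          (pvChains (PySem.Str.slice start none (some (-1)) ++ w.1) (PySem.Set.diff words [w.1]))) := by
      funext ret w
      rw [ex4, pv_mainAux (PySem.Set.diff words [w.1]).length _ (Nat.le_refl _)]
    rw [hfun]
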